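-- pv_equiv track=rewrite | github.com/krzysztof-turowski/programming-contests | google-code-jam/2010-qualification-round/theme_park.py | solve
-- ===== SOURCE A (Python) =====
-- import bisect
-- import itertools
--
-- def solve(G, R, K):
--     V = list(itertools.accumulate([0] + G + G))
--     indices = [min(i + len(G), bisect.bisect(V[1:], v + K)) % len(G)
--                for i, v in enumerate(V[:len(G)])]
--     sums = [V[j] - V[i] if i < j else V[j] + V[len(G)] - V[i]
--             for i, j in enumerate(indices)]
--     index, out = 0, 0
--     for _ in range(R):
--         index, out = indices[index], out + sums[index]
--     return out
-- ===== SOURCE B (Python) =====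
-- def solve(G, R, K):
--     # Faster: prefix sums built by one explicit loop, a hand-written binary
--     # search for the next start, and cycle detection so the R rides are
--     # totalled arithmetically instead of simulated one by one.
--     if R <= 0:
--         return 0
--     n = len(G)
--     P = [0]
--     for t in range(2 * n):
--         P.append(P[-1] + G[t % n])
--     total = P[n]
--
--     def br(target):
--         lo, hi = 0, 2 * n
--         while lo < hi:
--             mid = (lo + hi) // 2
--             if target < P[mid + 1]:
--                 hi = mid
--             else:
--                 lo = mid + 1
--         return lo
--
--     nxt = []
--     gain = []
--     for i in range(n):
--         j = min(i + n, br(P[i] + K)) % n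
--         nxt.append(j)
--         gain.append(P[j] - P[i] if i < j else P[j] + total - P[i])
--
--     first = [-1] * n          # first[j] = ride number at which start j was first used
--     pref = [0]                # pref[t] = riders after t rides
--     idx, t = 0, 0
--     while t < R and first[idx] == -1:
--         first[idx] = t
--         pref.append(pref[-1] + gain[idx])
--         idx = nxt[idx]
--         t += 1
--     if t == R:
--         return pref[t]
--     s = first[idx]            # rides s..t-1 repeat forever
--     p = t - s
--     C = pref[t] - pref[s]
--     full, extra = divmod(R - s, p)
--     return pref[s + extra] + full * C
-- ===== Notes on version B (the rewrite author's own statement) =====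
-- stated objective: faster
-- what changed: B builds the doubled prefix-sum array with one explicit loop, finds each start's next index with its own binary search (no library bisect, no per-index re-slicing of V as in A), builds the next/gain tables in a single fold, and replaces A's ride-by-ride simulation of all R rides by detecting the cycle of the start-index sequence and adding the cycle's rider contribution arithmetically with one divmod.
import Mathlib
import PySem

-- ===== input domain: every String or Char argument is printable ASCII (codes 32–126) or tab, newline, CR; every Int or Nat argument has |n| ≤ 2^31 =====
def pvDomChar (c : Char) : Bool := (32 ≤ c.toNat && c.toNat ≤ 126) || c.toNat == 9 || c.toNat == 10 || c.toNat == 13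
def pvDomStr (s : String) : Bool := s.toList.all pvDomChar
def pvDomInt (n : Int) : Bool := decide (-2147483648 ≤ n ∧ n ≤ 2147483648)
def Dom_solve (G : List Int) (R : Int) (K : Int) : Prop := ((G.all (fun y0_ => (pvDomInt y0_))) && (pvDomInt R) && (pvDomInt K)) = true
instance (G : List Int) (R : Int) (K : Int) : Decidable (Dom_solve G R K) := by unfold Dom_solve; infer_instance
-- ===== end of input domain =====

-- B rebuilds the precomputation its own way (explicit prefix-sum loop, hand-written binary
-- search, tables built in one fold) and replaces A's ride-by-ride simulation by cycle
-- detection with the cycle's contribution added arithmetically (asymptotically faster).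

-- ===== PORT A =====
-- itertools.accumulate: running sums (exact; accumulate([0]+G+G) = pvAccum 0 (0 :: (G ++ G)))
def pvAccum (acc : Int) : List Int → List Int
  | [] => []
  | x :: xs => (acc + x) :: pvAccum (acc + x) xs

-- V = list(itertools.accumulate([0] + G + G))
def pvV (G : List Int) : List Int := pvAccum 0 (0 :: (G ++ G))

-- indices = [min(i + len(G), bisect.bisect(V[1:], v + K)) % len(G) for i, v in enumerate(V[:len(G)])]
-- V[1:] is .drop 1 (exact, start ≥ 0); i, % computed in Nat (all operands nonnegative — exact)
def pvIndices (G : List Int) (K : Int) : List Nat :=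
  (PySem.List.enumerate ((pvV G).take G.length)).map
    (fun iv => min (iv.1.toNat + G.length)
        (PySem.List.bisectRight ((pvV G).drop 1) (iv.2 + K)) % G.length)

-- sums = [V[j] - V[i] if i < j else V[j] + V[len(G)] - V[i] for i, j in enumerate(indices)]
-- V[i], V[j], V[len(G)]: indices are in range on every input A accepts, so getD is exact
def pvSums (G : List Int) (K : Int) : List Int :=
  (PySem.List.enumerate (pvIndices G K)).map
    (fun ij => if ij.1.toNat < ij.2 then (pvV G).getD ij.2 0 - (pvV G).getD ij.1.toNat 0
               else (pvV G).getD ij.2 0 + (pvV G).getD G.length 0 - (pvV G).getD ij.1.toNat 0)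

-- for _ in range(R): index, out = indices[index], out + sums[index]  (range(R) runs R.toNat times)
def solve (G : List Int) (R : Int) (K : Int) : Int :=
  ((List.range R.toNat).foldl
    (fun st _ => ((pvIndices G K).getD st.1 0, st.2 + (pvSums G K).getD st.1 0))
    ((0 : Nat), (0 : Int))).2

-- ===== PORT B =====
-- P = [0]; for t in range(2*n): P.append(P[-1] + G[t % n])   (loop indices are in range — getD is exact)
def bPref (G : List Int) : List Int :=
  (List.range (2 * G.length)).foldl
    (fun P t => P ++ [P.getD (P.length - 1) 0 + G.getD (t % G.length) 0]) [0]

-- Source B's own binary search br(target): while lo < hi: mid = (lo+hi)//2; …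
-- fuel = 2*n only makes the while loop structural (it halves the interval each step)
def bSearch (P : List Int) (target : Int) : Nat → Nat → Nat → Nat
  | 0, lo, _ => lo
  | fuel + 1, lo, hi =>
    if lo < hi then
      if target < P.getD ((lo + hi) / 2 + 1) 0 then bSearch P target fuel lo ((lo + hi) / 2)
      else bSearch P target fuel ((lo + hi) / 2 + 1) hi
    else lo

-- j = min(i + n, br(P[i] + K)) % n
def bNext (G : List Int) (K : Int) (i : Nat) : Nat :=
  min (i + G.length)
    (bSearch (bPref G) ((bPref G).getD i 0 + K) (2 * G.length) 0 (2 * G.length)) % G.length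

-- gain.append(P[j] - P[i] if i < j else P[j] + total - P[i])
def bGain (G : List Int) (K : Int) (i : Nat) : Int :=
  if i < bNext G K i then (bPref G).getD (bNext G K i) 0 - (bPref G).getD i 0
  else (bPref G).getD (bNext G K i) 0 + (bPref G).getD G.length 0 - (bPref G).getD i 0

-- for i in range(n): nxt.append(j); gain.append(…)
def bTables (G : List Int) (K : Int) : List Nat × List Int :=
  (List.range G.length).foldl
    (fun nb i => (nb.1 ++ [bNext G K i], nb.2 ++ [bGain G K i])) ([], [])

-- the cycle-detection while loop of Source B; fuel = len(G)+1 only makes the recursion structural —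
-- the loop provably exits within len(G) iterations (the 0-branch is dead code, see loopB_eq below)
def solveAltLoop (idxs : List Nat) (sms : List Int) (R : Int)
    (first pref : List Int) (idx t : Nat) : Nat → Int
  | 0 => 0
  | fuel + 1 =>
    if (t : Int) < R ∧ first.getD idx 0 = -1 then
      solveAltLoop idxs sms R (first.set idx (t : Int))
        (pref ++ [pref.getD (pref.length - 1) 0 + sms.getD idx 0])
        (idxs.getD idx 0) (t + 1) fuel
    else if (t : Int) = R then pref.getD t 0
    else
      let s := (first.getD idx 0).toNat
      let p := t - s
      let C := pref.getD t 0 - pref.getD s 0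
      let full := PySem.Int.floordiv (R - (s : Int)) (p : Int)
      let extra := PySem.Int.mod (R - (s : Int)) (p : Int)
      pref.getD (s + extra.toNat) 0 + full * C

def solve_alt (G : List Int) (R : Int) (K : Int) : Int :=
  if R ≤ 0 then 0
  else solveAltLoop (bTables G K).1 (bTables G K).2 R
        (List.replicate G.length (-1)) [0] 0 0 (G.length + 1)

-- ===== PRECONDITION & SPEC =====
-- Pre_ excludes only G = [] with R ≥ 1, where A raises (indices[index] raises IndexError on the first ride).
def Pre_solve (G : List Int) (R : Int) (K : Int) : Prop := G ≠ [] ∨ R ≤ 0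
instance (G : List Int) (R : Int) (K : Int) : Decidable (Pre_solve G R K) := by unfold Pre_solve; infer_instance
def pvWitness_solve : List Int × Int × Int := ([1, 2, 1], 5, 3)
def Spec_solve (G : List Int) (R : Int) (K : Int) (out : Int) : Prop := out = solve_alt G R K
instance (G : List Int) (R : Int) (K : Int) (out : Int) : Decidable (Spec_solve G R K out) := by unfold Spec_solve; infer_instance

-- ===== CLAIM (what is proved, stated in full; the proofs are below) =====
def Claim_equal_solve : Prop := ∀ (G : List Int) (R : Int) (K : Int), Dom_solve G R K → Pre_solve G R K → Spec_solve G R K (solve G R K)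

-- ===== LEMMAS AND PROOFS =====

-- the iteration underlying both programs: start index after k rides, riders after k rides
def stF (idxs : List Nat) : Nat → Nat
  | 0 => 0
  | k + 1 => idxs.getD (stF idxs k) 0

def accF (idxs : List Nat) (sms : List Int) : Nat → Int
  | 0 => 0
  | k + 1 => accF idxs sms k + sms.getD (stF idxs k) 0

lemma pvAccum_length (a : Int) (l : List Int) : (pvAccum a l).length = l.length := by
  induction l generalizing a with
  | nil => rfl
  | cons x xs ih => simp [pvAccum, ih]

lemma length_pvV (G : List Int) : (pvV G).length = 2 * G.length + 1 := by
  simp [pvV, pvAccum_length]; omega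

lemma length_pvIndices (G : List Int) (K : Int) : (pvIndices G K).length = G.length := by
  simp [pvIndices, PySem.List.length_enumerate, length_pvV]
  omega

lemma mem_pvIndices_lt (G : List Int) (K : Int) (hn : 0 < G.length) :
    ∀ x ∈ pvIndices G K, x < G.length := by
  intro x hx
  simp only [pvIndices, List.mem_map] at hx
  obtain ⟨iv, -, rfl⟩ := hx
  exact Nat.mod_lt _ hn

-- ---- bridge: B's precomputation equals A's ----

lemma pvAccum_getD_succ (l : List Int) :
    ∀ (a : Int) (k : Nat), k + 1 < l.length →
      (pvAccum a l).getD (k + 1) 0 = (pvAccum a l).getD k 0 + l.getD (k + 1) 0 := by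
  induction l with
  | nil => intro a k h; simp at h
  | cons x xs ih =>
    intro a k h
    cases k with
    | zero =>
      cases xs with
      | nil => simp at h
      | cons y ys => simp [pvAccum]
    | succ k =>
      simp only [pvAccum, List.getD_cons_succ, List.length_cons] at *
      exact ih (a + x) k (by omega)

lemma pvV_zero (G : List Int) : (pvV G).getD 0 0 = 0 := by
  simp [pvV, pvAccum]

lemma double_getD (G : List Int) (k : Nat) (hk : k < 2 * G.length) :
    (G ++ G).getD k 0 = G.getD (k % G.length) 0 := by
  rcases Nat.lt_or_ge k G.length with h | h
  · rw [List.getD_append _ _ _ _ h, Nat.mod_eq_of_lt h]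
  · have h2 : k % G.length = k - G.length := by
      rw [Nat.mod_eq_sub_mod h, Nat.mod_eq_of_lt (by omega)]
    rw [h2, List.getD_append_right _ _ _ _ h]

lemma pvV_succ (G : List Int) (k : Nat) (hk : k < 2 * G.length) :
    (pvV G).getD (k + 1) 0 = (pvV G).getD k 0 + G.getD (k % G.length) 0 := by
  have h := pvAccum_getD_succ (0 :: (G ++ G)) 0 k (by simp; omega)
  rw [pvV, h, List.getD_cons_succ, double_getD G k hk]

lemma bPref_partial (G : List Int) :
    ∀ m, m ≤ 2 * G.length →
      (List.range m).foldl
        (fun P t => P ++ [P.getD (P.length - 1) 0 + G.getD (t % G.length) 0]) [0]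
        = (pvV G).take (m + 1) := by
  intro m hm
  induction m with
  | zero =>
    have h1 : (pvV G).take 1 = [(pvV G).getD 0 0] := by
      cases hV : pvV G with
      | nil => have := length_pvV G; rw [hV] at this; simp at this
      | cons v vs => simp
    rw [h1, pvV_zero]; rfl
  | succ m ih =>
    rw [List.range_succ, List.foldl_append, ih (by omega), List.foldl_cons, List.foldl_nil]
    have hlen : ((pvV G).take (m + 1)).length = m + 1 := by
      rw [List.length_take, length_pvV]; omega
    have hgetm : ((pvV G).take (m + 1)).getD (m + 1 - 1) 0 = (pvV G).getD m 0 := by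
      simp only [Nat.add_sub_cancel]
      rw [List.getD_eq_getElem _ _ (by omega), List.getD_eq_getElem _ _ (by rw [length_pvV]; omega)]
      simp
    rw [hlen, hgetm, ← pvV_succ G m (by omega)]
    have hstep : (pvV G).take (m + 1 + 1) = (pvV G).take (m + 1) ++ [(pvV G).getD (m + 1) 0] := by
      rw [List.take_succ]
      congr 1
      rw [List.getElem?_eq_getElem (by rw [length_pvV]; omega)]
      rw [List.getD_eq_getElem _ _ (by rw [length_pvV]; omega)]
      rfl
    rw [hstep]

lemma bPref_eq (G : List Int) : bPref G = pvV G := by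
  rw [bPref, bPref_partial G (2 * G.length) (le_refl _)]
  rw [← length_pvV G, List.take_length]

lemma bSearch_eq (G : List Int) (x : Int) :
    ∀ (fuel lo hi : Nat), hi ≤ 2 * G.length →
      bSearch (pvV G) x fuel lo hi = PySem.List.bisectRightLoop ((pvV G).drop 1) x fuel lo hi := by
  intro fuel
  induction fuel with
  | zero => intro lo hi _; rfl
  | succ fuel ih =>
    intro lo hi hhi
    rw [bSearch, PySem.List.bisectRightLoop]
    by_cases hlh : lo < hi
    · rw [if_pos hlh, if_pos hlh]
      have hmid : (lo + hi) / 2 < 2 * G.length := by omega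
      have hidx : ((pvV G).drop 1)[(lo + hi) / 2]? = some ((pvV G).getD ((lo + hi) / 2 + 1) 0) := by
        have hlt : 1 + (lo + hi) / 2 < (pvV G).length := by rw [length_pvV]; omega
        rw [List.getElem?_drop, List.getElem?_eq_getElem hlt,
            List.getD_eq_getElem _ _ (by rw [length_pvV]; omega)]
        simp [Nat.add_comm]
      rw [hidx]
      dsimp only
      by_cases hc : x < (pvV G).getD ((lo + hi) / 2 + 1) 0
      · rw [if_pos hc, if_pos hc, ih lo ((lo + hi) / 2) (by omega)]
      · rw [if_neg hc, if_neg hc, ih ((lo + hi) / 2 + 1) hi hhi]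
    · rw [if_neg hlh, if_neg hlh]

lemma enumerate_eq_map {α : Type} (d : α) :
    ∀ (xs : List α) (s : Int),
      PySem.List.enumerate xs s = (List.range xs.length).map (fun (i : Nat) => (s + (i : Int), xs.getD i d)) := by
  intro xs
  induction xs with
  | nil => intro s; rfl
  | cons x t ih =>
    intro s
    rw [PySem.List.enumerate, ih (s + 1)]
    rw [List.length_cons, List.range_succ_eq_map, List.map_cons, List.map_map]
    congr 1
    · simp
    · apply List.map_congr_left
      intro i _
      simp only [Function.comp_apply, Nat.succ_eq_add_one, List.getD_cons_succ, Prod.mk.injEq]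
      exact ⟨by push_cast; ring, trivial⟩

lemma foldl_pair_append {α β : Type} (f : Nat → α) (g : Nat → β) :
    ∀ (l : List Nat) (a : List α) (b : List β),
      l.foldl (fun nb i => (nb.1 ++ [f i], nb.2 ++ [g i])) (a, b) = (a ++ l.map f, b ++ l.map g) := by
  intro l
  induction l with
  | nil => intro a b; simp
  | cons x t ih => intro a b; simp [ih]

lemma getD_map_range {α : Type} (f : Nat → α) (d : α) (n i : Nat) (hi : i < n) :
    ((List.range n).map f).getD i d = f i := by
  rw [List.getD_eq_getElem _ _ (by simpa using hi)]
  simp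

lemma pvIndices_eq (G : List Int) (K : Int) :
    pvIndices G K = (List.range G.length).map (bNext G K) := by
  rw [pvIndices, enumerate_eq_map (0 : Int), List.map_map]
  have hlen : ((pvV G).take G.length).length = G.length := by
    rw [List.length_take, length_pvV]; omega
  rw [hlen]
  apply List.map_congr_left
  intro i hi
  have hi' : i < G.length := List.mem_range.mp hi
  simp only [Function.comp_apply, bNext, bPref_eq]
  rw [bSearch_eq G _ _ 0 (2 * G.length) (le_refl _)]
  have htake : ((pvV G).take G.length).getD i 0 = (pvV G).getD i 0 := by
    rw [List.getD_eq_getElem _ _ (by rw [hlen]; omega),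
        List.getD_eq_getElem _ _ (by rw [length_pvV]; omega)]
    simp
  rw [PySem.List.bisectRight]
  have hdlen : ((pvV G).drop 1).length = 2 * G.length := by
    rw [List.length_drop, length_pvV]; omega
  rw [hdlen, htake]
  simp

lemma pvIndices_getD (G : List Int) (K : Int) (i : Nat) (hi : i < G.length) :
    (pvIndices G K).getD i 0 = bNext G K i := by
  rw [pvIndices_eq, getD_map_range _ _ _ _ hi]

lemma pvSums_eq (G : List Int) (K : Int) :
    pvSums G K = (List.range G.length).map (bGain G K) := by
  rw [pvSums, enumerate_eq_map (0 : Nat), List.map_map, length_pvIndices]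
  apply List.map_congr_left
  intro i hi
  have hi' : i < G.length := List.mem_range.mp hi
  simp only [Function.comp_apply, bGain, bPref_eq]
  rw [pvIndices_getD G K i hi']
  simp

lemma bTables_eq (G : List Int) (K : Int) :
    bTables G K = (pvIndices G K, pvSums G K) := by
  rw [bTables, foldl_pair_append, pvIndices_eq, pvSums_eq]
  simp

-- ---- end bridge ----

lemma stF_lt (idxs : List Nat) (n : Nat) (hn : 0 < n) (hlen : idxs.length = n)
    (hmem : ∀ x ∈ idxs, x < n) : ∀ k, stF idxs k < n := by
  intro k
  induction k with
  | zero => simpa [stF] using hn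
  | succ k ih =>
    have hk : stF idxs k < idxs.length := by omega
    simp only [stF]
    exact hmem _ (by rw [List.getD_eq_getElem _ _ hk]; exact List.getElem_mem hk)

lemma foldA (idxs : List Nat) (sms : List Int) (m : Nat) :
    (List.range m).foldl
      (fun st _ => (idxs.getD st.1 0, st.2 + sms.getD st.1 0)) ((0 : Nat), (0 : Int))
      = (stF idxs m, accF idxs sms m) := by
  induction m with
  | zero => rfl
  | succ m ih =>
    rw [List.range_succ, List.foldl_append, List.foldl_cons, List.foldl_nil, ih]
    rfl

lemma st_per (idxs : List Nat) (s p : Nat) (hc : stF idxs (s + p) = stF idxs s) :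
    ∀ k, s ≤ k → stF idxs (k + p) = stF idxs k := by
  intro k hk
  induction k, hk using Nat.le_induction with
  | base => exact hc
  | succ m hm ih =>
    have : m + 1 + p = (m + p) + 1 := by omega
    rw [this]
    simp only [stF, ih]

lemma acc_per (idxs : List Nat) (sms : List Int) (s p : Nat)
    (hst : ∀ k, s ≤ k → stF idxs (k + p) = stF idxs k) :
    ∀ k, s ≤ k → accF idxs sms (k + p)
      = accF idxs sms k + (accF idxs sms (s + p) - accF idxs sms s) := by
  intro k hk
  induction k, hk using Nat.le_induction with
  | base => ring
  | succ m hm ih =>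
    have h1 : m + 1 + p = (m + p) + 1 := by omega
    rw [h1]
    simp only [accF, ih, hst m hm]
    ring

lemma acc_iter (idxs : List Nat) (sms : List Int) (s p : Nat)
    (hst : ∀ k, s ≤ k → stF idxs (k + p) = stF idxs k) :
    ∀ (q k : Nat), s ≤ k → accF idxs sms (k + q * p)
      = accF idxs sms k + (q : Int) * (accF idxs sms (s + p) - accF idxs sms s) := by
  intro q
  induction q with
  | zero => intro k _; simp
  | succ q ih =>
    intro k hk
    have h1 : k + (q + 1) * p = (k + p) + q * p := by ring
    rw [h1, ih (k + p) (by omega), acc_per idxs sms s p hst k hk]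
    push_cast
    ring

lemma getD_set_self' (l : List Int) (i : Nat) (v : Int) (h : i < l.length) :
    (l.set i v).getD i 0 = v := by
  rw [List.getD_eq_getElem _ _ (by simpa using h)]
  exact List.getElem_set_self (by simpa using h)

lemma getD_set_ne' (l : List Int) (i j : Nat) (v : Int) (h : i ≠ j) :
    (l.set i v).getD j 0 = l.getD j 0 := by
  rcases Nat.lt_or_ge j l.length with hj | hj
  · rw [List.getD_eq_getElem _ _ (by simpa using hj), List.getD_eq_getElem _ _ hj]
    exact List.getElem_set_ne h _
  · rw [List.getD_eq_default _ _ (by simpa using hj), List.getD_eq_default _ _ hj]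

lemma getD_concat_self (l : List Int) (x : Int) (k : Nat) (hk : k = l.length) :
    (l ++ [x]).getD k 0 = x := by
  subst hk
  rw [List.getD_eq_getElem _ _ (by simp)]
  simp

lemma loopB_eq (idxs : List Nat) (sms : List Int) (R : Int) (n : Nat)
    (hn : 0 < n) (hlen : idxs.length = n) (hmem : ∀ x ∈ idxs, x < n) :
    ∀ (fuel : Nat) (first pref : List Int) (t : Nat),
      fuel + t = n + 1 →
      (t : Int) ≤ R →
      first.length = n →
      (∀ j, j < n → first.getD j 0 = -1 ∨
        ∃ k, k < t ∧ stF idxs k = j ∧ first.getD j 0 = (k : Int)) →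
      (∀ k, k < t → first.getD (stF idxs k) 0 ≠ -1) →
      (∀ k1 k2, k1 < t → k2 < t → stF idxs k1 = stF idxs k2 → k1 = k2) →
      pref.length = t + 1 →
      (∀ k, k ≤ t → pref.getD k 0 = accF idxs sms k) →
      solveAltLoop idxs sms R first pref (stF idxs t) t fuel = accF idxs sms R.toNat := by
  intro fuel
  induction fuel with
  | zero =>
    intro first pref t hfuel _ _ _ _ hinj _ _
    exfalso
    have ht : t = n + 1 := by omega
    have hf : Function.Injective
        (fun k : Fin (n + 1) => (⟨stF idxs k, stF_lt idxs n hn hlen hmem k⟩ : Fin n)) := by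
      intro a b hab
      exact Fin.ext (hinj a b (by omega) (by omega) (congrArg Fin.val hab))
    have := Fintype.card_le_of_injective _ hf
    simp [Fintype.card_fin] at this
  | succ fuel ih =>
    intro first pref t hfuel htR hflen hfirst hseen hinj hplen hpref
    by_cases hcont : (t : Int) < R ∧ first.getD (stF idxs t) 0 = -1
    · -- loop continues: one more ride recorded
      rw [solveAltLoop, if_pos hcont]
      have hstt : stF idxs t < n := stF_lt idxs n hn hlen hmem t
      have hnext : idxs.getD (stF idxs t) 0 = stF idxs (t + 1) := rfl
      rw [hnext]
      apply ih
      · omega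
      · omega
      · simp [hflen]
      · -- first invariant
        intro j hj
        by_cases hje : j = stF idxs t
        · subst hje
          exact Or.inr ⟨t, by omega, rfl, getD_set_self' _ _ _ (by omega)⟩
        · rw [getD_set_ne' _ _ _ _ (fun h => hje h.symm)]
          rcases hfirst j hj with h | ⟨k, hk, hsk, hv⟩
          · exact Or.inl h
          · exact Or.inr ⟨k, by omega, hsk, hv⟩
      · -- every visited start index is marked
        intro k hk
        by_cases hke : stF idxs k = stF idxs t
        · rw [hke]
          rw [getD_set_self' _ _ _ (by omega)]
          intro h
          omega
        · have hkt : k < t := by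
            rcases Nat.lt_or_ge k t with h | h
            · exact h
            · exact absurd (by rw [show k = t by omega]) hke
          rw [getD_set_ne' _ _ _ _ (fun h => hke h.symm)]
          exact hseen k hkt
      · -- visited start indices stay distinct
        intro k1 k2 hk1 hk2 heq
        rcases Nat.lt_or_ge k1 t with h1 | h1 <;> rcases Nat.lt_or_ge k2 t with h2 | h2
        · exact hinj k1 k2 h1 h2 heq
        · exfalso
          have hk2t : k2 = t := by omega
          subst hk2t
          exact (hseen k1 h1) (heq ▸ hcont.2)
        · exfalso
          have hk1t : k1 = t := by omega
          subst hk1t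
          exact (hseen k2 h2) (heq ▸ hcont.2)
        · omega
      · simp [hplen]
      · -- pref extended by one prefix total
        intro k hk
        rcases Nat.lt_or_ge k (t + 1) with hkt | hkt
        · rw [List.getD_append _ _ _ _ (by omega)]
          exact hpref k (by omega)
        · have hkt1 : k = t + 1 := by omega
          subst hkt1
          rw [getD_concat_self _ _ _ (by omega)]
          have hlast : pref.getD (pref.length - 1) 0 = accF idxs sms t := by
            rw [hplen]
            exact hpref t (by omega)
          rw [hlast]
          rfl
    · rw [solveAltLoop, if_neg hcont]
      by_cases hstop : (t : Int) = R
      · -- exactly R rides walked: the prefix total is the answer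
        rw [if_pos hstop]
        have : R.toNat = t := by omega
        rw [this]
        exact hpref t (le_refl t)
      · -- cycle found: total the cycle arithmetically
        rw [if_neg hstop]
        have htR' : (t : Int) < R := lt_of_le_of_ne htR hstop
        have hmark : first.getD (stF idxs t) 0 ≠ -1 := by
          intro h; exact hcont ⟨htR', h⟩
        have hstt : stF idxs t < n := stF_lt idxs n hn hlen hmem t
        rcases hfirst (stF idxs t) hstt with h | ⟨s, hst, hss, hsv⟩
        · exact absurd h hmark
        · -- s < t, stF s = stF t: period p = t - s
          dsimp only
          rw [hsv]
          have hsnat : ((s : Int)).toNat = s := by omega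
          rw [hsnat]
          have hp : 0 < t - s := by omega
          have hcyc : stF idxs (s + (t - s)) = stF idxs s := by
            rw [Nat.add_sub_cancel' (by omega)]
            exact hss.symm ▸ rfl
          have hstper := st_per idxs s (t - s) hcyc
          have hppos : (0 : Int) < ((t - s : Nat) : Int) := by exact_mod_cast hp
          rw [PySem.Int.floordiv_eq_ediv_of_pos hppos, PySem.Int.mod_eq_emod_of_pos hppos]
          set p : Nat := t - s with hpdef
          set full : Int := (R - (s : Int)) / (p : Int) with hfull
          set extra : Int := (R - (s : Int)) % (p : Int) with hextra
          have hex0 : 0 ≤ extra := Int.emod_nonneg _ (by omega)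
          have hexp : extra < (p : Int) := Int.emod_lt_of_pos _ hppos
          have hfull0 : 0 ≤ full := Int.ediv_nonneg (by omega) (by omega)
          have hdm : (p : Int) * full + extra = R - (s : Int) := Int.mul_ediv_add_emod _ _
          set q : Nat := full.toNat with hq
          set r : Nat := extra.toNat with hr
          have hfq : full = (q : Int) := by omega
          have hxr : extra = (r : Int) := by omega
          have hRsplit : R.toNat = (s + r) + q * p := by
            have hpq : (p : Int) * (q : Int) = ((q * p : Nat) : Int) := by push_cast; ring
            rw [hfq, hxr, hpq] at hdm
            omega
          have hrp : r < p := by omega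
          have hsp : s + p = t := by omega
          have hacc := acc_iter idxs sms s p hstper q (s + r) (by omega)
          rw [hRsplit, hacc, hsp]
          rw [hpref t (by omega), hpref s (by omega), hpref (s + r) (by omega), hfq]

-- A's simulation computes the iteration totals
lemma solve_eq_accF (G : List Int) (R : Int) (K : Int) :
    solve G R K = accF (pvIndices G K) (pvSums G K) R.toNat := by
  rw [solve, foldA]

-- ===== VERDICT (by name: the statement is the Claim_ definition above) =====
theorem solve_spec : Claim_equal_solve := by
  intro G R K _ hpre
  unfold Spec_solve
  by_cases hR : R ≤ 0
  · rw [solve_eq_accF, solve_alt, if_pos hR]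
    have : R.toNat = 0 := by omega
    rw [this]; rfl
  · have hG : G ≠ [] := by
      rcases hpre with h | h
      · exact h
      · exact absurd h hR
    have hn : 0 < G.length := List.length_pos_iff.mpr hG
    rw [solve_eq_accF, solve_alt, if_neg hR, bTables_eq]
    have h0 : (0 : Nat) = stF (pvIndices G K) 0 := rfl
    rw [h0]
    refine (loopB_eq (pvIndices G K) (pvSums G K) R G.length hn
      (length_pvIndices G K) (mem_pvIndices_lt G K hn)
      (G.length + 1) (List.replicate G.length (-1)) [0] 0
      (by omega) (by omega) (by simp)
      ?_ (by omega) (by omega) (by simp)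
      ?_).symm
    · intro j hj
      left
      rw [List.getD_eq_getElem _ _ (by simpa using hj)]
      simp
    · intro k hk
      interval_cases k
      rfl
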